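-- pv_equiv track=rewrite | github.com/yunsejin/Algorithm | 백준/Diamond/1557. 제곱 ㄴㄴ/제곱 ㄴㄴ.py | count_square_free
-- ===== SOURCE A (Python) =====
-- from math import isqrt
--
-- def count_square_free(n):
--     mobius = [1] * (isqrt(n) + 1)
--     for i in range(2, len(mobius)):
--         if mobius[i] == 1:
--             for j in range(i, len(mobius), i):
--                 mobius[j] *= -i
--             if i * i < len(mobius):
--                 for j in range(i * i, len(mobius), i * i):
--                     mobius[j] = 0
--     for i in range(2, len(mobius)):
--         if mobius[i] == i:
--             mobius[i] = 1
--         elif mobius[i] == -i: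
--             mobius[i] = -1
--         elif mobius[i] < 0:
--             mobius[i] = 1
--         elif mobius[i] > 0:
--             mobius[i] = -1
--
--     count = 0
--     for i in range(1, len(mobius)):
--         if mobius[i]:
--             count += mobius[i] * (n // (i * i))
--     return count
-- ===== SOURCE B (Python) =====
-- from math import isqrt
--
-- def _mu(d):
--     # Moebius function by trial division: 0 if a squared prime divides d,
--     # else (-1)^(number of prime factors).
--     mu = 1
--     p = 2
--     while p * p <= d:
--         if d % p == 0:
--             d //= p
--             if d % p == 0:
--                 return 0
--             mu = -mu
--         p += 1
--     if d > 1: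
--         mu = -mu
--     return mu
--
-- def count_square_free(n):
--     total = 0
--     for d in range(1, isqrt(n) + 1):
--         total += _mu(d) * (n // (d * d))
--     return total
-- ===== Notes on version B (the rewrite author's own statement) =====
-- stated objective: simpler
-- what changed: Replaced the two-pass Moebius sieve over a mutable array (plus a sign-normalization pass) by a direct per-term Moebius computation via trial division inside a single accumulation loop; no array is built at all.
import Mathlib
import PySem

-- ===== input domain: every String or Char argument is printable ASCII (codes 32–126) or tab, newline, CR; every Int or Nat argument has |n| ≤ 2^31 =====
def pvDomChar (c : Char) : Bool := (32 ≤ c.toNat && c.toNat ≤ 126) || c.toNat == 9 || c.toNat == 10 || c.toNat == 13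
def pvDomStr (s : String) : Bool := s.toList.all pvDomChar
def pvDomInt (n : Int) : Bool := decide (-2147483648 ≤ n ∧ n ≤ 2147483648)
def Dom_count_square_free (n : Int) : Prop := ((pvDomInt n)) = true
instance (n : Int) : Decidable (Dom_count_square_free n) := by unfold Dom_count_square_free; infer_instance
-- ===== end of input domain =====

-- B replaces A's two-pass Möbius sieve (mutable array + sign-normalization pass) by a per-term
-- trial-division Möbius computation inside one accumulation loop (objective: simpler; not faster).

-- ===== PORT A =====
-- math.isqrt, exact on the inputs Pre_ admits; Python raises ValueError on negative arguments.
def pyIsqrt (n : Int) : Nat := Nat.sqrt n.toNat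

def count_square_free (n : Int) : Int :=
  let L : Nat := pyIsqrt n + 1                                -- len(mobius), constant throughout
  let m0 : List Int := List.replicate L 1                     -- mobius = [1] * (isqrt(n) + 1)
  let m1 := (PySem.List.pyRange 2 (L : Int) 1).foldl (fun m i =>
      if PySem.List.pyGetD m i 0 = 1 then
        let m' := (PySem.List.pyRange i (L : Int) i).foldl
            (fun m j => PySem.List.pySetD m j (PySem.List.pyGetD m j 0 * (-i))) m
        if i * i < (L : Int) then
          (PySem.List.pyRange (i * i) (L : Int) (i * i)).foldl
            (fun m j => PySem.List.pySetD m j 0) m'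
        else m'
      else m) m0
  let m2 := (PySem.List.pyRange 2 (L : Int) 1).foldl (fun m i =>
      let v := PySem.List.pyGetD m i 0
      if v = i then PySem.List.pySetD m i 1
      else if v = -i then PySem.List.pySetD m i (-1)
      else if v < 0 then PySem.List.pySetD m i 1
      else if 0 < v then PySem.List.pySetD m i (-1)
      else m) m1
  (PySem.List.pyRange 1 (L : Int) 1).foldl (fun c i =>
      if PySem.List.pyGetD m2 i 0 ≠ 0 then
        c + PySem.List.pyGetD m2 i 0 * PySem.Int.floordiv n (i * i)
      else c) 0

-- ===== PORT B =====
-- _mu's while loop; all Python values here are nonnegative ints (d ≥ 1, p ≥ 2), so Nat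
-- arithmetic (%, /) is exact for Python's % and //.  `mu` is the Python accumulator.
def muLoop (d p : Nat) (mu : Int) : Int :=
  if p * p ≤ d then
    if d % p = 0 then
      if (d / p) % p = 0 then 0
      else muLoop (d / p) (p + 1) (-mu)
    else muLoop d (p + 1) mu
  else if 1 < d then -mu else mu
termination_by (d, d + 1 - p)
decreasing_by
  · rename_i h1 h2 h3
    have hp2 : 2 ≤ p := by
      by_contra hlt
      interval_cases p <;> simp_all
    have hd4 : 4 ≤ d := le_trans (Nat.mul_le_mul hp2 hp2) h1
    exact Prod.Lex.left _ _ (Nat.div_lt_self (by omega) (by omega))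
  · rename_i h1 h2
    have hpd : p ≤ d := by
      rcases Nat.eq_zero_or_pos p with h | h
      · omega
      · exact le_trans (Nat.le_mul_of_pos_left p h) h1
    exact Prod.Lex.right _ (by omega)

def count_square_free_alt (n : Int) : Int :=
  (PySem.List.pyRange 1 ((pyIsqrt n : Int) + 1) 1).foldl
    (fun total d => total + muLoop d.toNat 2 1 * PySem.Int.floordiv n (d * d)) 0

-- ===== PRECONDITION & SPEC =====
-- math.isqrt raises ValueError on negative arguments (in both A and B); Pre_ admits every input A returns on.
def Pre_count_square_free (n : Int) : Prop := 0 ≤ n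
instance (n : Int) : Decidable (Pre_count_square_free n) := by unfold Pre_count_square_free; infer_instance
def pvWitness_count_square_free : Int := 10

def Spec_count_square_free (n : Int) (out : Int) : Prop := out = count_square_free_alt n
instance (n : Int) (out : Int) : Decidable (Spec_count_square_free n out) := by unfold Spec_count_square_free; infer_instance

-- ===== CLAIM (what is proved, stated in full; the proofs are below) =====
def Claim_equal_count_square_free : Prop := ∀ (n : Int), Dom_count_square_free n → Pre_count_square_free n → Spec_count_square_free n (count_square_free n)

-- ===== LEMMAS AND PROOFS =====

-- The mathematical Möbius function both programs compute pointwise.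
def muSpec (j : Nat) : Int := if Squarefree j then (-1) ^ j.primeFactors.card else 0

-- product of (-p) over the primes p ≤ b dividing j
def prodP (b j : Nat) : Int := ∏ p ∈ j.primeFactors.filter (· ≤ b), (-(p : Int))

-- the primes p ≤ b with p² ∣ j
def badSet (b j : Nat) : Finset Nat := j.primeFactors.filter (fun p => p ≤ b ∧ p * p ∣ j)

-- value of mobius[j] after the first phase has processed every i ≤ b
def gfun (b j : Nat) : Int := if j = 0 then 1 else if badSet b j ≠ ∅ then 0 else prodP b j

-- ---- generic batch-update lemma for folds of pySetD over distinct indices ----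
theorem length_foldl_pySetD (F : Int → Int → Int) (js : List Int) (l0 : List Int) :
    (js.foldl (fun l j => PySem.List.pySetD l j (F j (PySem.List.pyGetD l j 0))) l0).length
      = l0.length := by
  induction js generalizing l0 with
  | nil => rfl
  | cons j js ih => rw [List.foldl_cons, ih, PySem.List.length_pySetD]

theorem foldl_pySetD_getElem? (F : Int → Int → Int) (js : List Int) (l0 : List Int)
    (hnd : js.Nodup) (hj : ∀ j ∈ js, 0 ≤ j ∧ j < (l0.length : Int)) (k : Nat) :
    (js.foldl (fun l j => PySem.List.pySetD l j (F j (PySem.List.pyGetD l j 0))) l0)[k]?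
      = if (k : Int) ∈ js then (l0[k]?).map (F (k : Int)) else l0[k]? := by
  induction js generalizing l0 with
  | nil => simp
  | cons j js ih =>
    obtain ⟨hj0, hjlt⟩ := hj j List.mem_cons_self
    have hjN : j.toNat < l0.length := by omega
    have hjcast : ((j.toNat : Nat) : Int) = j := Int.toNat_of_nonneg hj0
    have hset : PySem.List.pySetD l0 j (F j (PySem.List.pyGetD l0 j 0))
        = l0.set j.toNat (F j (PySem.List.pyGetD l0 j 0)) :=
      PySem.List.pySetD_of_nonneg _ _ hj0
    have hmem : ∀ x ∈ js, 0 ≤ x ∧ x <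
        ((PySem.List.pySetD l0 j (F j (PySem.List.pyGetD l0 j 0))).length : Int) := by
      intro x hx
      rw [PySem.List.length_pySetD]
      exact hj x (List.mem_cons_of_mem _ hx)
    rw [List.foldl_cons, ih _ (List.nodup_cons.mp hnd).2 hmem, hset]
    by_cases hk1 : (k : Int) ∈ js
    · have hne : j.toNat ≠ k := by
        intro h
        exact (List.nodup_cons.mp hnd).1 (by rw [← h, hjcast] at hk1; exact hk1)
      simp only [hk1, if_true, List.mem_cons, or_true, List.getElem?_set, hne, if_false]
    · by_cases hk2 : (k : Int) = j
      · have hkj : j.toNat = k := by omega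
        have hget : PySem.List.pyGetD l0 j 0 = l0[j.toNat] :=
          PySem.List.pyGetD_eq_getElem l0 0 hj0 (by exact_mod_cast hjlt)
        rw [if_neg hk1, if_pos (List.mem_cons.mpr (Or.inl hk2)),
          List.getElem?_set, if_pos hkj, if_pos hjN,
          List.getElem?_eq_getElem (by omega : k < l0.length)]
        simp only [Option.map_some, hget, hkj, hk2]
      · have hne : j.toNat ≠ k := by omega
        simp only [hk1, if_false, List.mem_cons, hk2, false_or, List.getElem?_set, hne, if_false]

-- ---- facts about muSpec ----
theorem muSpec_one : muSpec 1 = 1 := by simp [muSpec]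

theorem muSpec_prime {p : Nat} (hp : p.Prime) : muSpec p = -1 := by
  simp [muSpec, hp.squarefree, hp.primeFactors]

theorem muSpec_of_sq {d p : Nat} (hp : p.Prime) (h : p * p ∣ d) : muSpec d = 0 := by
  have : ¬ Squarefree d := fun hs => (Nat.squarefree_iff_prime_squarefree.mp hs) p hp h
  simp [muSpec, this]

theorem muSpec_mul_prime {p m : Nat} (hp : p.Prime) (hm : m ≠ 0) (hpm : ¬ p ∣ m) :
    muSpec (p * m) = -muSpec m := by
  have hcop : Nat.Coprime p m := (Nat.Prime.coprime_iff_not_dvd hp).mpr hpm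
  by_cases hsq : Squarefree m
  · have hsq' : Squarefree (p * m) := (Nat.squarefree_mul hcop).mpr ⟨hp.squarefree, hsq⟩
    have hpf : (p * m).primeFactors = insert p m.primeFactors := by
      rw [Nat.primeFactors_mul hp.pos.ne' hm, hp.primeFactors, Finset.singleton_union]
    have hnot : p ∉ m.primeFactors := fun h => hpm (Nat.dvd_of_mem_primeFactors h)
    rw [muSpec, muSpec, if_pos hsq', if_pos hsq, hpf,
      Finset.card_insert_of_notMem hnot, pow_succ]
    ring
  · have hsq' : ¬ Squarefree (p * m) := fun h => hsq ((Nat.squarefree_mul hcop).mp h).2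
    simp [muSpec, hsq', hsq]

-- the while loop of B's _mu computes mu * muSpec d when every prime factor of d is ≥ p
theorem muLoop_eq : ∀ (d p : Nat) (mu : Int), 1 ≤ d → 2 ≤ p →
    (∀ q, q.Prime → q ∣ d → p ≤ q) → muLoop d p mu = mu * muSpec d := by
  intro d p mu
  induction d, p, mu using muLoop.induct with
  | case1 d p mu h1 h2 h3 =>
    intro hd hp hfac
    have hpd : p ∣ d := Nat.dvd_of_mod_eq_zero h2
    have hppr : p.Prime := by
      rw [Nat.prime_def_minFac]
      refine ⟨hp, le_antisymm (Nat.minFac_le (by omega)) ?_⟩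
      exact hfac p.minFac (Nat.minFac_prime (by omega)) ((Nat.minFac_dvd p).trans hpd)
    have hsq : p * p ∣ d := by
      obtain ⟨k, hk⟩ := Nat.dvd_of_mod_eq_zero h3
      refine ⟨k, ?_⟩
      rw [← Nat.div_mul_cancel hpd, hk]
      ring
    rw [muLoop, if_pos h1, if_pos h2, if_pos h3, muSpec_of_sq hppr hsq, mul_zero]
  | case2 d p mu h1 h2 h3 ih =>
    intro hd hp hfac
    have hpd : p ∣ d := Nat.dvd_of_mod_eq_zero h2
    have hppr : p.Prime := by
      rw [Nat.prime_def_minFac]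
      refine ⟨hp, le_antisymm (Nat.minFac_le (by omega)) ?_⟩
      exact hfac p.minFac (Nat.minFac_prime (by omega)) ((Nat.minFac_dvd p).trans hpd)
    have hple : p ≤ d := le_trans (Nat.le_mul_of_pos_left p (by omega)) h1
    have hd1 : 1 ≤ d / p := (Nat.one_le_div_iff (by omega)).mpr hple
    have hnp : ¬ p ∣ d / p := fun h => h3 (Nat.mod_eq_zero_of_dvd h)
    have hrec := ih hd1 (by omega) ?_
    · rw [muLoop, if_pos h1, if_pos h2, if_neg h3, hrec]
      have hdm : d = p * (d / p) := (Nat.mul_div_cancel' hpd).symm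
      have hms : muSpec d = -muSpec (d / p) := by
        conv_lhs => rw [hdm]
        exact muSpec_mul_prime hppr (by omega) hnp
      rw [hms]; ring
    · intro q hq hqd
      have hq' : q ∣ d := hqd.trans (Nat.div_dvd_of_dvd hpd)
      have : p ≤ q := hfac q hq hq'
      rcases Nat.eq_or_lt_of_le this with h | h
      · exact absurd (h ▸ hqd) hnp
      · omega
  | case3 d p mu h1 h2 ih =>
    intro hd hp hfac
    have hrec := ih hd (by omega) ?_
    · rw [muLoop, if_pos h1, if_neg h2, hrec]
    · intro q hq hqd
      have : p ≤ q := hfac q hq hqd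
      rcases Nat.eq_or_lt_of_le this with h | h
      · exact absurd (h ▸ hqd) (fun hc => h2 (Nat.mod_eq_zero_of_dvd hc))
      · omega
  | case4 d p mu h1 h2 =>
    intro hd hp hfac
    have hdpr : d.Prime := by
      by_contra hc
      have hsq : d.minFac ^ 2 ≤ d := Nat.minFac_sq_le_self (by omega) hc
      have hpf : p ≤ d.minFac := hfac d.minFac (Nat.minFac_prime (by omega)) (Nat.minFac_dvd d)
      exact h1 (le_trans (by nlinarith) hsq)
    rw [muLoop, if_neg h1, if_pos h2, muSpec_prime hdpr]
    ring
  | case5 d p mu h1 h2 =>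
    intro hd hp hfac
    have : d = 1 := by omega
    rw [muLoop, if_neg h1, if_neg h2, this, muSpec_one, mul_one]

-- proof-side names for the two sieve passes of port A (definitionally the port's lets)
def sieve1 (L : Nat) : List Int :=
  (PySem.List.pyRange 2 (L : Int) 1).foldl (fun m i =>
      if PySem.List.pyGetD m i 0 = 1 then
        let m' := (PySem.List.pyRange i (L : Int) i).foldl
            (fun m j => PySem.List.pySetD m j (PySem.List.pyGetD m j 0 * (-i))) m
        if i * i < (L : Int) then
          (PySem.List.pyRange (i * i) (L : Int) (i * i)).foldl
            (fun m j => PySem.List.pySetD m j 0) m'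
        else m'
      else m) (List.replicate L 1)

def sieve2 (L : Nat) : List Int :=
  (PySem.List.pyRange 2 (L : Int) 1).foldl (fun m i =>
      let v := PySem.List.pyGetD m i 0
      if v = i then PySem.List.pySetD m i 1
      else if v = -i then PySem.List.pySetD m i (-1)
      else if v < 0 then PySem.List.pySetD m i 1
      else if 0 < v then PySem.List.pySetD m i (-1)
      else m) (sieve1 L)

-- ---- small utilities ----
theorem nodup_pyRange_pos (a b s : Int) (hs : 0 < s) : (PySem.List.pyRange a b s).Nodup := by
  rw [PySem.List.pyRange_of_pos a b hs]
  refine List.Nodup.map ?_ List.nodup_range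
  intro k1 k2 h
  have h2 : s * (k1 : Int) = s * (k2 : Int) := by linarith
  have := mul_left_cancel₀ (ne_of_gt hs) h2
  exact_mod_cast this

theorem mem_pyRange_mult (a L k : Nat) (ha : 1 ≤ a) :
    ((k : Int) ∈ PySem.List.pyRange (a : Int) (L : Int) (a : Int)) ↔ (a ≤ k ∧ k < L ∧ a ∣ k) := by
  rw [PySem.List.mem_pyRange_iff_of_pos (by exact_mod_cast ha)]
  constructor
  · rintro ⟨h1, h2, h3⟩
    have h4 : (a : Int) ∣ (k : Int) := by
      have := dvd_add h3 (dvd_refl (a : Int)); simpa using this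
    exact ⟨by exact_mod_cast h1, by exact_mod_cast h2, by exact_mod_cast h4⟩
  · rintro ⟨h1, h2, h3⟩
    exact ⟨by exact_mod_cast h1, by exact_mod_cast h2,
      dvd_sub (by exact_mod_cast h3) (dvd_refl _)⟩

theorem pyGetD_map_range (f : Nat → Int) (L : Nat) (i : Int) (h0 : 0 ≤ i) :
    PySem.List.pyGetD ((List.range L).map f) i 0
      = if i.toNat < L then f i.toNat else 0 := by
  by_cases h : i.toNat < L
  · rw [if_pos h]
    have hlen : i < (((List.range L).map f).length : Int) := by
      rw [List.length_map, List.length_range]; omega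
    rw [PySem.List.pyGetD_eq_getElem _ _ h0 hlen]
    simp
  · rw [if_neg h]
    simp only [PySem.List.pyGetD, PySem.List.pyGet?, PySem.List.pyIdx?]
    rw [if_pos h0, if_neg (by rw [List.length_map, List.length_range]; omega :
      ¬ i < (((List.range L).map f).length : Int))]
    rfl

theorem pySetD_pyGetD_self (l : List Int) (i : Int) (h : 0 ≤ i) :
    PySem.List.pySetD l i (PySem.List.pyGetD l i 0) = l := by
  by_cases hlt : i.toNat < l.length
  · rw [PySem.List.pyGetD_eq_getElem l 0 h (by omega), PySem.List.pySetD_of_nonneg _ _ h]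
    exact List.set_getElem_self hlt
  · rw [PySem.List.pySetD_of_nonneg _ _ h]
    exact List.set_eq_of_length_le (by omega)

-- ---- facts about gfun ----
theorem gfun_zero (b : Nat) : gfun b 0 = 1 := by simp [gfun]

theorem gfun_one (b : Nat) : gfun b 1 = 1 := by
  simp [gfun, badSet, prodP, Nat.primeFactors_one]

theorem gfun_succ_eq (b j : Nat) (h : ¬((b + 1).Prime ∧ (b + 1) ∣ j ∧ j ≠ 0)) :
    gfun (b + 1) j = gfun b j := by
  by_cases hj : j = 0
  · subst hj; rw [gfun_zero, gfun_zero]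
  · have hfacts : j.primeFactors.filter (· ≤ b + 1) = j.primeFactors.filter (· ≤ b) := by
      apply Finset.filter_congr
      intro p hp
      have hple : p ≠ b + 1 := by
        rintro rfl
        exact h ⟨(Nat.mem_primeFactors.mp hp).1, (Nat.mem_primeFactors.mp hp).2.1, hj⟩
      omega
    have hbad : badSet (b + 1) j = badSet b j := by
      unfold badSet
      apply Finset.filter_congr
      intro p hp
      have hple : p ≠ b + 1 := by
        rintro rfl
        exact h ⟨(Nat.mem_primeFactors.mp hp).1, (Nat.mem_primeFactors.mp hp).2.1, hj⟩
      constructor <;> rintro ⟨h1, h2⟩ <;> exact ⟨by omega, h2⟩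
    unfold gfun prodP
    rw [hbad, hfacts]

theorem prodP_eq (b j : Nat) :
    prodP b j = (-1) ^ ((j.primeFactors.filter (· ≤ b)).card)
      * ∏ p ∈ j.primeFactors.filter (· ≤ b), (p : Int) := by
  unfold prodP
  rw [← Finset.prod_const, ← Finset.prod_mul_distrib]
  apply Finset.prod_congr rfl
  intro p _
  ring

theorem prod_primes_ge_two {S : Finset Nat} {j : Nat} (hS : S ⊆ j.primeFactors)
    (hne : S.Nonempty) : 2 ≤ ∏ p ∈ S, (p : Int) := by
  have hnat : 2 ≤ ∏ p ∈ S, p := by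
    obtain ⟨a, ha⟩ := hne
    rw [← Finset.prod_erase_mul _ _ ha]
    have ha2 : 2 ≤ a := (Nat.mem_primeFactors.mp (hS ha)).1.two_le
    have hrest : 1 ≤ ∏ p ∈ S.erase a, p := by
      rw [Nat.one_le_iff_ne_zero]
      apply Finset.prod_ne_zero_iff.mpr
      intro p hp
      exact (Nat.mem_primeFactors.mp (hS (Finset.mem_of_mem_erase hp))).1.pos.ne'
    calc 2 = 1 * 2 := by ring
      _ ≤ (∏ p ∈ S.erase a, p) * a := Nat.mul_le_mul hrest ha2
  calc (2 : Int) = ((2 : Nat) : Int) := by norm_num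
    _ ≤ ((∏ p ∈ S, p : Nat) : Int) := by exact_mod_cast hnat
    _ = ∏ p ∈ S, (p : Int) := by rw [Nat.cast_prod]

theorem gfun_prime_self (c : Nat) (hp : (c + 1).Prime) : gfun c (c + 1) = 1 := by
  have hfac : (c + 1).primeFactors = {c + 1} := hp.primeFactors
  have hflt : (c + 1).primeFactors.filter (· ≤ c) = ∅ := by
    rw [hfac]
    ext p
    simp only [Finset.mem_filter, Finset.mem_singleton, Finset.notMem_empty, iff_false]
    rintro ⟨rfl, h⟩; omega
  have hbad : badSet c (c + 1) = ∅ := by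
    unfold badSet
    ext p
    simp only [Finset.mem_filter, Finset.notMem_empty, iff_false]
    rintro ⟨hmem, hle, _⟩
    rw [hfac, Finset.mem_singleton] at hmem
    omega
  unfold gfun prodP
  rw [if_neg (by omega), if_neg (by simp [hbad]), hflt, Finset.prod_empty]

theorem gfun_composite_ne_one (c : Nat) (h2 : 2 ≤ c + 1) (hnp : ¬(c + 1).Prime) :
    gfun c (c + 1) ≠ 1 := by
  unfold gfun
  rw [if_neg (by omega)]
  by_cases hbad : badSet c (c + 1) ≠ ∅
  · rw [if_pos hbad]; norm_num
  · rw [if_neg hbad]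
    set q := (c + 1).minFac with hq
    have hqp : q.Prime := Nat.minFac_prime (by omega)
    have hqd : q ∣ c + 1 := Nat.minFac_dvd _
    have hqlt : q ≤ c := by
      have hle : q ≤ c + 1 := Nat.le_of_dvd (by omega) hqd
      rcases Nat.eq_or_lt_of_le hle with h | h
      · exact absurd (Nat.prime_def_minFac.mpr ⟨h2, by omega⟩) hnp
      · omega
    have hmem : q ∈ (c + 1).primeFactors.filter (· ≤ c) :=
      Finset.mem_filter.mpr ⟨Nat.mem_primeFactors.mpr ⟨hqp, hqd, by omega⟩, hqlt⟩
    have h2le := prod_primes_ge_two (Finset.filter_subset _ _) ⟨q, hmem⟩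
    rw [prodP_eq]
    intro hcontra
    rcases Nat.even_or_odd (((c + 1).primeFactors.filter (· ≤ c)).card) with he | ho
    · rw [he.neg_one_pow, one_mul] at hcontra; omega
    · rw [ho.neg_one_pow, neg_one_mul] at hcontra; omega

-- value facts used in the prime step
theorem gfun_step_sq (c k : Nat) (hpr : (c + 1).Prime) (hk : (c + 1) * (c + 1) ∣ k)
    (hk0 : k ≠ 0) : gfun (c + 1) k = 0 := by
  have hdvd : (c + 1) ∣ k := dvd_trans (dvd_mul_left _ _) hk
  have hmem : (c + 1) ∈ badSet (c + 1) k := by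
    unfold badSet
    rw [Finset.mem_filter]
    exact ⟨Nat.mem_primeFactors.mpr ⟨hpr, hdvd, hk0⟩, le_refl _, hk⟩
  unfold gfun
  rw [if_neg hk0, if_pos (by intro h; rw [h] at hmem; exact absurd hmem (Finset.notMem_empty _))]

theorem gfun_step_div (c k : Nat) (hpr : (c + 1).Prime) (hk : (c + 1) ∣ k)
    (hk2 : ¬ (c + 1) * (c + 1) ∣ k) (hk0 : k ≠ 0) :
    gfun (c + 1) k = gfun c k * (-((c + 1 : Nat) : Int)) := by
  unfold gfun
  rw [if_neg hk0, if_neg hk0]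
  by_cases hbad : badSet c k ≠ ∅
  · have hsub : badSet c k ⊆ badSet (c + 1) k := by
      intro p hp
      obtain ⟨hmem, hle, hsq⟩ := Finset.mem_filter.mp hp
      exact Finset.mem_filter.mpr ⟨hmem, by omega, hsq⟩
    rw [if_pos (show badSet (c + 1) k ≠ ∅ from fun h =>
      hbad (Finset.subset_empty.mp (by rw [h] at hsub; exact hsub))), if_pos hbad, zero_mul]
  · push_neg at hbad
    have hbad1 : badSet (c + 1) k = ∅ := by
      ext p
      simp only [Finset.notMem_empty, iff_false]
      intro hp
      obtain ⟨hmem, hle, hsq⟩ := Finset.mem_filter.mp hp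
      rcases Nat.eq_or_lt_of_le hle with h | h
      · exact hk2 (h ▸ hsq)
      · have hin : p ∈ badSet c k := Finset.mem_filter.mpr ⟨hmem, by omega, hsq⟩
        rw [hbad] at hin; exact absurd hin (Finset.notMem_empty _)
    rw [if_neg (by simp [hbad1]), if_neg (by simp [hbad])]
    unfold prodP
    have hins : k.primeFactors.filter (· ≤ c + 1)
        = insert (c + 1) (k.primeFactors.filter (· ≤ c)) := by
      ext p
      simp only [Finset.mem_filter, Finset.mem_insert]
      constructor
      · rintro ⟨hmem, hle⟩
        rcases Nat.eq_or_lt_of_le hle with h | h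
        · exact Or.inl h
        · exact Or.inr ⟨hmem, by omega⟩
      · rintro (rfl | ⟨hmem, hle⟩)
        · exact ⟨Nat.mem_primeFactors.mpr ⟨hpr, hk, hk0⟩, le_refl _⟩
        · exact ⟨hmem, by omega⟩
    rw [hins, Finset.prod_insert (by simp only [Finset.mem_filter]; rintro ⟨_, h⟩; omega)]
    push_cast
    ring

-- final value of the first phase
theorem gfun_final (L k : Nat) (hk1 : 1 ≤ k) (hkL : k < L) :
    gfun (L - 1) k = if Squarefree k then (-1 : Int) ^ k.primeFactors.card * k else 0 := by
  have hk0 : k ≠ 0 := by omega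
  unfold gfun
  rw [if_neg hk0]
  by_cases hsq : Squarefree k
  · rw [if_pos hsq]
    have hempty : badSet (L - 1) k = ∅ := by
      ext p
      simp only [Finset.notMem_empty, iff_false]
      intro hp
      obtain ⟨hmem, _, hppd⟩ := Finset.mem_filter.mp hp
      exact (Nat.squarefree_iff_prime_squarefree.mp hsq) p
        (Nat.prime_of_mem_primeFactors hmem) hppd
    rw [if_neg (by simp [hempty])]
    have hfull : k.primeFactors.filter (· ≤ L - 1) = k.primeFactors :=
      Finset.filter_true_of_mem (fun p hp => by
        have := Nat.le_of_mem_primeFactors hp; omega)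
    rw [prodP_eq, hfull]
    congr 1
    calc ∏ p ∈ k.primeFactors, (p : Int) = ((∏ p ∈ k.primeFactors, p : Nat) : Int) := by
          rw [Nat.cast_prod]
      _ = (k : Int) := by rw [Nat.prod_primeFactors_of_squarefree hsq]
  · rw [if_neg hsq]
    have hex : ¬ ∀ x, x.Prime → ¬ x * x ∣ k :=
      fun h => hsq (Nat.squarefree_iff_prime_squarefree.mpr h)
    push_neg at hex
    obtain ⟨p, hp, hpd⟩ := hex
    have hple : p ≤ L - 1 := by
      have h1 : p * p ≤ k := Nat.le_of_dvd (by omega) hpd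
      have h2 : p ≤ p * p := Nat.le_mul_of_pos_left p hp.pos
      omega
    have hmem : p ∈ badSet (L - 1) k := Finset.mem_filter.mpr
      ⟨Nat.mem_primeFactors.mpr ⟨hp, dvd_trans (dvd_mul_left _ _) hpd, hk0⟩, hple, hpd⟩
    rw [if_pos (fun h => absurd (h ▸ hmem) (Finset.notMem_empty _))]

-- ---- phase 1 ----
-- step1 is definitionally the body of the first loop of port A (the let zeta-reduces)
def step1 (L : Nat) (m : List Int) (i : Int) : List Int :=
  if PySem.List.pyGetD m i 0 = 1 then
    if i * i < (L : Int) then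
      (PySem.List.pyRange (i * i) (L : Int) (i * i)).foldl
        (fun m j => PySem.List.pySetD m j 0)
        ((PySem.List.pyRange i (L : Int) i).foldl
          (fun m j => PySem.List.pySetD m j (PySem.List.pyGetD m j 0 * (-i))) m)
    else
      (PySem.List.pyRange i (L : Int) i).foldl
        (fun m j => PySem.List.pySetD m j (PySem.List.pyGetD m j 0 * (-i))) m
  else m

theorem gfun_small (b k : Nat) (hb : b ≤ 1) : gfun b k = 1 := by
  have hbad : badSet b k = ∅ := by
    ext p; simp only [Finset.notMem_empty, iff_false]
    intro hp
    obtain ⟨hmem, hle, -⟩ := Finset.mem_filter.mp hp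
    have := (Nat.prime_of_mem_primeFactors hmem).two_le; omega
  have hflt : k.primeFactors.filter (· ≤ b) = ∅ := by
    ext p; simp only [Finset.mem_filter, Finset.notMem_empty, iff_false]
    rintro ⟨hmem, hle⟩
    have := (Nat.prime_of_mem_primeFactors hmem).two_le; omega
  unfold gfun prodP
  rw [hbad, hflt, Finset.prod_empty]
  simp

theorem getElem?_map_range (f : Nat → Int) (L k : Nat) (hk : k < L) :
    ((List.range L).map f)[k]? = some (f k) := by
  rw [List.getElem?_map, List.getElem?_range hk, Option.map_some]

theorem replicate_eq_map_gfun (L b : Nat) (hb : b ≤ 1) :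
    (List.replicate L (1 : Int)) = (List.range L).map (gfun b) := by
  apply List.ext_getElem?
  intro k
  by_cases hk : k < L
  · rw [getElem?_map_range _ _ _ hk, gfun_small b k hb,
      List.getElem?_eq_getElem (by simpa using hk), List.getElem_replicate]
  · rw [List.getElem?_eq_none (by simpa using hk),
      List.getElem?_eq_none (by rw [List.length_map, List.length_range]; omega)]

theorem phase1_step (L c : Nat) (hc : 1 ≤ c) :
    step1 L ((List.range L).map (gfun c)) ((c : Int) + 1)
      = (List.range L).map (gfun (c + 1)) := by
  have htn : ((c : Int) + 1).toNat = c + 1 := by omega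
  have hread : PySem.List.pyGetD ((List.range L).map (gfun c)) ((c : Int) + 1) 0
      = if c + 1 < L then gfun c (c + 1) else 0 := by
    rw [pyGetD_map_range _ _ _ (by omega), htn]
  unfold step1
  by_cases hiL : c + 1 < L
  swap
  · rw [hread, if_neg hiL, if_neg (by norm_num)]
    apply List.map_congr_left
    intro j hj
    rw [List.mem_range] at hj
    refine (gfun_succ_eq c j ?_).symm
    rintro ⟨h1, h2, h3⟩
    have := Nat.le_of_dvd (by omega) h2
    omega
  · by_cases hpr : (c + 1).Prime
    swap
    · rw [hread, if_pos hiL, if_neg (gfun_composite_ne_one c (by omega) hpr)]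
      apply List.map_congr_left
      intro j hj
      exact (gfun_succ_eq c j (fun h => hpr h.1)).symm
    · rw [hread, if_pos hiL, gfun_prime_self c hpr, if_pos rfl]
      have hlenM : ((List.range L).map (gfun c)).length = L := by
        rw [List.length_map, List.length_range]
      have hcast1 : ((c : Int) + 1) = (((c + 1 : Nat)) : Int) := by push_cast; ring
      have hnd1 : (PySem.List.pyRange ((c : Int) + 1) (L : Int) ((c : Int) + 1)).Nodup :=
        nodup_pyRange_pos _ _ _ (by omega)
      have hb1 : ∀ j ∈ PySem.List.pyRange ((c : Int) + 1) (L : Int) ((c : Int) + 1),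
          0 ≤ j ∧ j < ((((List.range L).map (gfun c))).length : Int) := by
        intro j hj
        obtain ⟨ha, hb, -⟩ := (PySem.List.mem_pyRange_iff_of_pos (by omega) j).mp hj
        rw [hlenM]
        omega
      set A := (PySem.List.pyRange ((c : Int) + 1) (L : Int) ((c : Int) + 1)).foldl
        (fun m j => PySem.List.pySetD m j (PySem.List.pyGetD m j 0 * (-((c : Int) + 1))))
        ((List.range L).map (gfun c)) with hAdef
      have hAk : ∀ k : Nat, A[k]?
          = if ((k : Int)) ∈ PySem.List.pyRange ((c : Int) + 1) (L : Int) ((c : Int) + 1)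
            then (((List.range L).map (gfun c))[k]?).map (fun v => v * (-((c : Int) + 1)))
            else ((List.range L).map (gfun c))[k]? :=
        fun k => foldl_pySetD_getElem? (fun _ v => v * (-((c : Int) + 1)))
          (PySem.List.pyRange ((c : Int) + 1) (L : Int) ((c : Int) + 1))
          ((List.range L).map (gfun c)) hnd1 hb1 k
      have hALen : A.length = L := by
        have h := length_foldl_pySetD (fun _ v => v * (-((c : Int) + 1)))
          (PySem.List.pyRange ((c : Int) + 1) (L : Int) ((c : Int) + 1))
          ((List.range L).map (gfun c))
        exact h.trans hlenM
      have hmem1 : ∀ k : Nat,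
          (((k : Int)) ∈ PySem.List.pyRange ((c : Int) + 1) (L : Int) ((c : Int) + 1))
          ↔ (c + 1 ≤ k ∧ k < L ∧ (c + 1) ∣ k) := by
        intro k
        rw [hcast1]
        exact mem_pyRange_mult (c + 1) L k (by omega)
      have hcore : ∀ k : Nat, k < L → ¬((c + 1) * (c + 1) ∣ k ∧ k ≠ 0) →
          (if ((k : Int)) ∈ PySem.List.pyRange ((c : Int) + 1) (L : Int) ((c : Int) + 1)
            then (((List.range L).map (gfun c))[k]?).map (fun v => v * (-((c : Int) + 1)))
            else ((List.range L).map (gfun c))[k]?) = some (gfun (c + 1) k) := by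
        intro k hkL hns
        by_cases hdv : (c + 1) ∣ k ∧ c + 1 ≤ k
        · have hk0 : k ≠ 0 := by omega
          have hsqn : ¬ (c + 1) * (c + 1) ∣ k := fun h => hns ⟨h, hk0⟩
          rw [if_pos ((hmem1 k).mpr ⟨hdv.2, hkL, hdv.1⟩), getElem?_map_range _ _ _ hkL]
          simp only [Option.map_some]
          rw [gfun_step_div c k hpr hdv.1 hsqn hk0, hcast1]
        · rw [if_neg (fun hin => hdv ⟨((hmem1 k).mp hin).2.2, ((hmem1 k).mp hin).1⟩),
            getElem?_map_range _ _ _ hkL]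
          congr 1
          refine (gfun_succ_eq c k ?_).symm
          rintro ⟨-, hd, h0⟩
          exact hdv ⟨hd, Nat.le_of_dvd (by omega) hd⟩
      by_cases hz : ((c : Int) + 1) * ((c : Int) + 1) < (L : Int)
      · rw [if_pos hz]
        set ZA := (PySem.List.pyRange (((c : Int) + 1) * ((c : Int) + 1)) (L : Int)
            (((c : Int) + 1) * ((c : Int) + 1))).foldl
            (fun m j => PySem.List.pySetD m j 0) A with hZAdef
        have hcast2 : ((c : Int) + 1) * ((c : Int) + 1)
            = ((((c + 1) * (c + 1) : Nat)) : Int) := by push_cast; ring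
        have hnd2 : (PySem.List.pyRange (((c : Int) + 1) * ((c : Int) + 1)) (L : Int)
            (((c : Int) + 1) * ((c : Int) + 1))).Nodup :=
          nodup_pyRange_pos _ _ _ (by positivity)
        have hb2 : ∀ j ∈ PySem.List.pyRange (((c : Int) + 1) * ((c : Int) + 1)) (L : Int)
            (((c : Int) + 1) * ((c : Int) + 1)), 0 ≤ j ∧ j < ((A.length) : Int) := by
          intro j hj
          obtain ⟨ha, hb, -⟩ := (PySem.List.mem_pyRange_iff_of_pos (by positivity) j).mp hj
          rw [hALen]
          have hpos : (0 : Int) < ((c : Int) + 1) * ((c : Int) + 1) := by positivity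
          exact ⟨by linarith, by omega⟩
        have hmem2 : ∀ k : Nat,
            (((k : Int)) ∈ PySem.List.pyRange (((c : Int) + 1) * ((c : Int) + 1)) (L : Int)
              (((c : Int) + 1) * ((c : Int) + 1)))
            ↔ ((c + 1) * (c + 1) ≤ k ∧ k < L ∧ (c + 1) * (c + 1) ∣ k) := by
          intro k
          rw [hcast2]
          exact mem_pyRange_mult ((c + 1) * (c + 1)) L k
            (Nat.one_le_iff_ne_zero.mpr (Nat.mul_ne_zero (by omega) (by omega)))
        have hZk : ∀ k : Nat, ZA[k]?
            = if ((k : Int)) ∈ PySem.List.pyRange (((c : Int) + 1) * ((c : Int) + 1)) (L : Int)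
                (((c : Int) + 1) * ((c : Int) + 1))
              then (A[k]?).map (fun _ => (0 : Int)) else A[k]? :=
          fun k => foldl_pySetD_getElem? (fun _ _ => (0 : Int)) _ A hnd2 hb2 k
        have hZLen : ZA.length = L := by
          have h := length_foldl_pySetD (fun _ _ => (0 : Int))
            (PySem.List.pyRange (((c : Int) + 1) * ((c : Int) + 1)) (L : Int)
              (((c : Int) + 1) * ((c : Int) + 1))) A
          exact h.trans hALen
        apply List.ext_getElem?
        intro k
        by_cases hkL : k < L
        · rw [getElem?_map_range _ _ _ hkL]
          by_cases hsq2 : (c + 1) * (c + 1) ∣ k ∧ k ≠ 0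
          · have hge : (c + 1) * (c + 1) ≤ k := Nat.le_of_dvd (by omega) hsq2.1
            rw [hZk k, if_pos ((hmem2 k).mpr ⟨hge, hkL, hsq2.1⟩),
              List.getElem?_eq_getElem (show k < A.length by omega)]
            simp only [Option.map_some]
            rw [gfun_step_sq c k hpr hsq2.1 hsq2.2]
          · rw [hZk k, if_neg (fun hin => hsq2 ⟨((hmem2 k).mp hin).2.2, by
              have h1 := ((hmem2 k).mp hin).1
              have h2 : 0 < (c + 1) * (c + 1) := by positivity
              omega⟩), hAk k, hcore k hkL hsq2]
        · rw [List.getElem?_eq_none (show ZA.length ≤ k by omega),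
            List.getElem?_eq_none (show (((List.range L).map (gfun (c + 1)))).length ≤ k by
              rw [List.length_map, List.length_range]; omega)]
      · rw [if_neg hz]
        have hzn : (L : Nat) ≤ (c + 1) * (c + 1) := by
          have h := not_lt.mp hz
          have hcast2 : ((c : Int) + 1) * ((c : Int) + 1)
              = ((((c + 1) * (c + 1) : Nat)) : Int) := by push_cast; ring
          rw [hcast2] at h
          exact_mod_cast h
        apply List.ext_getElem?
        intro k
        by_cases hkL : k < L
        · rw [getElem?_map_range _ _ _ hkL, hAk k, hcore k hkL ?_]
          rintro ⟨hdd, h0⟩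
          have hge : (c + 1) * (c + 1) ≤ k := Nat.le_of_dvd (by omega) hdd
          omega
        · rw [List.getElem?_eq_none (show A.length ≤ k by omega),
            List.getElem?_eq_none (show (((List.range L).map (gfun (c + 1)))).length ≤ k by
              rw [List.length_map, List.length_range]; omega)]

theorem step1_foldl_eq (L : Nat) : ∀ c : Nat,
    (PySem.List.pyRange 2 ((c : Int) + 1) 1).foldl (step1 L) (List.replicate L 1)
      = (List.range L).map (gfun c) := by
  intro c
  induction c with
  | zero =>
    rw [PySem.List.pyRange_one_eq_nil (by norm_num)]
    exact replicate_eq_map_gfun L 0 (by omega)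
  | succ c ih =>
    by_cases hc : 1 ≤ c
    · have hsplit : PySem.List.pyRange 2 (((c + 1 : Nat) : Int) + 1) 1
          = PySem.List.pyRange 2 ((c : Int) + 1) 1 ++ [(c : Int) + 1] := by
        rw [show (((c + 1 : Nat) : Int) + 1) = ((c : Int) + 1) + 1 by push_cast; ring]
        exact PySem.List.pyRange_one_succ_right (by omega : (2 : Int) ≤ (c : Int) + 1)
      rw [hsplit, List.foldl_append, ih, List.foldl_cons, List.foldl_nil]
      exact phase1_step L c hc
    · have hc0 : c = 0 := by omega
      subst hc0
      rw [show (((0 + 1 : Nat) : Int) + 1) = (2 : Int) by norm_num,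
        PySem.List.pyRange_one_eq_nil (by norm_num)]
      exact replicate_eq_map_gfun L 1 (by omega)

theorem sieve1_eq (L : Nat) (hL : 1 ≤ L) :
    sieve1 L = (List.range L).map (gfun (L - 1)) := by
  have h1 : sieve1 L = (PySem.List.pyRange 2 ((L : Int)) 1).foldl (step1 L)
      (List.replicate L 1) := rfl
  rw [h1, show ((L : Int)) = (((L - 1 : Nat)) : Int) + 1 by omega]
  exact step1_foldl_eq L (L - 1)

-- ---- phase 2 ----
def F2 (i v : Int) : Int :=
  if v = i then 1 else if v = -i then -1 else if v < 0 then 1 else if 0 < v then -1 else v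

theorem sieve2_eq_fold (L : Nat) : sieve2 L
    = (PySem.List.pyRange 2 (L : Int) 1).foldl
        (fun m i => PySem.List.pySetD m i (F2 i (PySem.List.pyGetD m i 0))) (sieve1 L) := by
  apply PySem.List.foldl_congr_mem
  intro m i hi
  have hi0 : 0 ≤ i := by
    have := PySem.List.mem_pyRange_one.mp hi
    omega
  show (if PySem.List.pyGetD m i 0 = i then PySem.List.pySetD m i 1
      else if PySem.List.pyGetD m i 0 = -i then PySem.List.pySetD m i (-1)
      else if PySem.List.pyGetD m i 0 < 0 then PySem.List.pySetD m i 1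
      else if 0 < PySem.List.pyGetD m i 0 then PySem.List.pySetD m i (-1)
      else m)
    = PySem.List.pySetD m i (F2 i (PySem.List.pyGetD m i 0))
  unfold F2
  split_ifs <;> try rfl
  exact (pySetD_pyGetD_self m i hi0).symm

theorem sieve2_char (L k : Nat) (hk1 : 1 ≤ k) (hkL : k < L) :
    (sieve2 L)[k]? = some (muSpec k) := by
  have hL1 : 1 ≤ L := by omega
  rw [sieve2_eq_fold L, sieve1_eq L hL1]
  have hb : ∀ j ∈ PySem.List.pyRange 2 (L : Int) 1,
      0 ≤ j ∧ j < ((((List.range L).map (gfun (L - 1)))).length : Int) := by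
    intro j hj
    have := PySem.List.mem_pyRange_one.mp hj
    rw [List.length_map, List.length_range]
    omega
  rw [foldl_pySetD_getElem? F2 _ _ (PySem.List.nodup_pyRange_one 2 (L : Int)) hb k]
  by_cases hk2 : 2 ≤ k
  · rw [if_pos (by rw [PySem.List.mem_pyRange_one]; omega), getElem?_map_range _ _ _ hkL]
    simp only [Option.map_some]
    congr 1
    rw [gfun_final L k hk1 hkL]
    unfold F2 muSpec
    by_cases hsq : Squarefree k
    · rw [if_pos hsq, if_pos hsq]
      rcases Nat.even_or_odd (k.primeFactors.card) with he | ho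
      · rw [he.neg_one_pow, one_mul, if_pos rfl]
      · rw [ho.neg_one_pow, neg_one_mul, if_neg (by omega), if_pos rfl]
    · rw [if_neg hsq, if_neg hsq, if_neg (by omega), if_neg (by omega),
        if_neg (by omega), if_neg (by omega)]
  · have hk1' : k = 1 := by omega
    subst hk1'
    rw [if_neg (by rw [PySem.List.mem_pyRange_one]; omega), getElem?_map_range _ _ _ hkL,
      gfun_one, muSpec_one]

theorem count_square_free_spec' (n : Int) : count_square_free n = count_square_free_alt n := by
  have hA : count_square_free n
      = (PySem.List.pyRange 1 ((pyIsqrt n + 1 : Nat) : Int) 1).foldl (fun c i =>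
          if PySem.List.pyGetD (sieve2 (pyIsqrt n + 1)) i 0 ≠ 0 then
            c + PySem.List.pyGetD (sieve2 (pyIsqrt n + 1)) i 0 * PySem.Int.floordiv n (i * i)
          else c) 0 := rfl
  have hB : count_square_free_alt n
      = (PySem.List.pyRange 1 ((pyIsqrt n + 1 : Nat) : Int) 1).foldl (fun total d =>
          total + muLoop d.toNat 2 1 * PySem.Int.floordiv n (d * d)) 0 := by
    rw [count_square_free_alt, show ((pyIsqrt n : Int) + 1) = ((pyIsqrt n + 1 : Nat) : Int)
      by push_cast; ring]
  rw [hA, hB]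
  apply PySem.List.foldl_congr_mem
  intro acc i hi
  obtain ⟨h1, h2⟩ := PySem.List.mem_pyRange_one.mp hi
  have hiN1 : 1 ≤ i.toNat := by omega
  have hiNL : i.toNat < pyIsqrt n + 1 := by omega
  have hcast : ((i.toNat : Nat) : Int) = i := by omega
  have hv : PySem.List.pyGetD (sieve2 (pyIsqrt n + 1)) i 0 = muSpec i.toNat := by
    rw [← hcast, PySem.List.pyGetD_natCast, List.getD_eq_getElem?_getD,
      sieve2_char (pyIsqrt n + 1) i.toNat hiN1 hiNL]
    rfl
  rw [hv, muLoop_eq i.toNat 2 1 hiN1 (le_refl 2) (fun q hq _ => hq.two_le), one_mul]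
  by_cases h0 : muSpec i.toNat = 0
  · rw [if_neg (fun h => h h0), h0]
    ring
  · rw [if_pos h0]

-- ===== VERDICT (by name: the statement is the Claim_ definition above) =====
theorem count_square_free_spec : Claim_equal_count_square_free := by
  intro n _ _
  exact count_square_free_spec' n
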